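-- pv_equiv track=rewrite | github.com/Kai-ruri/MahjongAI | mahjong_engine.py | _get_dora_tiles_internal
-- ===== SOURCE A (Python) =====
-- def _get_dora_tiles_internal(dora_indicators):
--     """ドラ表示牌リストから実際のドラ牌リストを返す（mahjong_engine内部用）"""
--     dora_tiles = []
--     for ind in dora_indicators:
--         if 0 <= ind <= 26:   # 数牌
--             suit = ind // 9
--             rank = ind % 9
--             dora_tiles.append(suit * 9 + (rank + 1) % 9)
--         elif 27 <= ind <= 30:  # 風牌
--             dora_tiles.append(27 + (ind - 27 + 1) % 4)
--         elif 31 <= ind <= 33:  # 三元牌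
--             dora_tiles.append(31 + (ind - 31 + 1) % 3)
--     return dora_tiles
-- ===== SOURCE B (Python) =====
-- # Dora order is five cycles of consecutive tiles; find the indicator's cycle
-- # by search and take the next element of the cycle (wrapping).
-- _DORA_CYCLES = [list(range(0, 9)), list(range(9, 18)), list(range(18, 27)),
--                 list(range(27, 31)), list(range(31, 34))]
--
-- def _get_dora_tiles_internal(dora_indicators):
--     dora_tiles = []
--     for ind in dora_indicators:
--         for cyc in _DORA_CYCLES:
--             if ind in cyc:
--                 pos = cyc.index(ind)
--                 dora_tiles.append(cyc[(pos + 1) % len(cyc)])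
--                 break
--     return dora_tiles
-- ===== Notes on version B (the rewrite author's own statement) =====
-- stated objective: alternative
-- what changed: Replaces A's per-branch suit/rank modular arithmetic with a search over the five explicit dora cycles: find the cycle containing the indicator, then return the next element of that cycle (wrapping), skipping indicators in no cycle.
import Mathlib
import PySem

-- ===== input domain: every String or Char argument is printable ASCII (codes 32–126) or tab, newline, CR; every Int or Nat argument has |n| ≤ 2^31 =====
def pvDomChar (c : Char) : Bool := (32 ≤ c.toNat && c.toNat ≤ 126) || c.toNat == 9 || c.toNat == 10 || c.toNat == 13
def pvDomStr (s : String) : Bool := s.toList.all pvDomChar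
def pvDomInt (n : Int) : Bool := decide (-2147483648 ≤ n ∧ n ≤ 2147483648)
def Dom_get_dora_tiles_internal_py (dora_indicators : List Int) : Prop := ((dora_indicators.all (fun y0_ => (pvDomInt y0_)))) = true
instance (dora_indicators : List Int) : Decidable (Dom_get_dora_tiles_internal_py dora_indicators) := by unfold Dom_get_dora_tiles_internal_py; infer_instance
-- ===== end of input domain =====

-- B replaces A's per-branch modular arithmetic by a search over the five explicit dora cycles (next element of the containing cycle, wrapping); same cost, alternative algorithm.

-- ===== PORT A =====
-- literal transliteration of A's loop: append per element, branches in order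
def get_dora_tiles_internal_py (dora_indicators : List Int) : List Int :=
  dora_indicators.foldl (fun dora_tiles ind =>
    if 0 ≤ ind ∧ ind ≤ 26 then
      dora_tiles ++ [(PySem.Int.floordiv ind 9) * 9 + PySem.Int.mod (PySem.Int.mod ind 9 + 1) 9]
    else if 27 ≤ ind ∧ ind ≤ 30 then
      dora_tiles ++ [27 + PySem.Int.mod (ind - 27 + 1) 4]
    else if 31 ≤ ind ∧ ind ≤ 33 then
      dora_tiles ++ [31 + PySem.Int.mod (ind - 31 + 1) 3]
    else dora_tiles) []

-- ===== PORT B =====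
-- the five dora cycles from Source B (_DORA_CYCLES)
def pvDoraCycles : List (List Int) :=
  [[0, 1, 2, 3, 4, 5, 6, 7, 8],
   [9, 10, 11, 12, 13, 14, 15, 16, 17],
   [18, 19, 20, 21, 22, 23, 24, 25, 26],
   [27, 28, 29, 30],
   [31, 32, 33]]

-- Source B's inner 'for cyc in _DORA_CYCLES: if ind in cyc: …; break' = first cycle containing ind;
-- cyc.index(ind) always succeeds there (the guard 'ind in cyc' held), so '.getD 0' is exact
def get_dora_tiles_internal_py_alt (dora_indicators : List Int) : List Int :=
  dora_indicators.foldl (fun dora_tiles ind =>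
    match pvDoraCycles.find? (fun cyc => cyc.contains ind) with
    | some cyc =>
        let pos : Nat := (PySem.List.index? cyc ind).getD 0
        dora_tiles ++ (PySem.List.pyGet? cyc (PySem.Int.mod ((pos : Int) + 1) cyc.length)).toList
    | none => dora_tiles) []

-- ===== PRECONDITION & SPEC =====
def Spec_get_dora_tiles_internal_py (dora_indicators : List Int) (out : List Int) : Prop := out = get_dora_tiles_internal_py_alt dora_indicators
instance (dora_indicators : List Int) (out : List Int) : Decidable (Spec_get_dora_tiles_internal_py dora_indicators out) := by unfold Spec_get_dora_tiles_internal_py; infer_instance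

-- ===== CLAIM =====
def Claim_equal_get_dora_tiles_internal_py : Prop := ∀ (dora_indicators : List Int), Dom_get_dora_tiles_internal_py dora_indicators → Spec_get_dora_tiles_internal_py dora_indicators (get_dora_tiles_internal_py dora_indicators)

-- ===== LEMMAS AND PROOFS =====

-- the element A's branch arithmetic appends for one indicator ([] = skipped)
def pvEmitA (ind : Int) : List Int :=
  if 0 ≤ ind ∧ ind ≤ 26 then
    [(PySem.Int.floordiv ind 9) * 9 + PySem.Int.mod (PySem.Int.mod ind 9 + 1) 9]
  else if 27 ≤ ind ∧ ind ≤ 30 then [27 + PySem.Int.mod (ind - 27 + 1) 4]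
  else if 31 ≤ ind ∧ ind ≤ 33 then [31 + PySem.Int.mod (ind - 31 + 1) 3]
  else []

-- the element B's cycle search appends for one indicator ([] = no cycle contains it)
def pvEmitB (ind : Int) : List Int :=
  match pvDoraCycles.find? (fun cyc => cyc.contains ind) with
  | some cyc =>
      let pos : Nat := (PySem.List.index? cyc ind).getD 0
      (PySem.List.pyGet? cyc (PySem.Int.mod ((pos : Int) + 1) cyc.length)).toList
  | none => []

theorem pvEmit_eq (ind : Int) : pvEmitA ind = pvEmitB ind := by
  by_cases h : 0 ≤ ind ∧ ind ≤ 33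
  · obtain ⟨h0, h1⟩ := h
    interval_cases ind <;> decide
  · have h26 : ¬ (0 ≤ ind ∧ ind ≤ 26) := by omega
    have h30 : ¬ (27 ≤ ind ∧ ind ≤ 30) := by omega
    have h33 : ¬ (31 ≤ ind ∧ ind ≤ 33) := by omega
    have hfind : pvDoraCycles.find? (fun cyc => cyc.contains ind) = none := by
      rw [List.find?_eq_none]
      intro cyc hcyc
      simp only [pvDoraCycles, List.mem_cons, List.not_mem_nil, or_false] at hcyc
      rcases hcyc with rfl | rfl | rfl | rfl | rfl <;>
        · simp only [List.contains_eq_mem, List.mem_cons, List.not_mem_nil,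
            decide_eq_true_eq, or_false]
          omega
    rw [pvEmitA, if_neg h26, if_neg h30, if_neg h33, pvEmitB, hfind]

theorem pvStepA (acc : List Int) (ind : Int) :
    (if 0 ≤ ind ∧ ind ≤ 26 then
      acc ++ [(PySem.Int.floordiv ind 9) * 9 + PySem.Int.mod (PySem.Int.mod ind 9 + 1) 9]
    else if 27 ≤ ind ∧ ind ≤ 30 then acc ++ [27 + PySem.Int.mod (ind - 27 + 1) 4]
    else if 31 ≤ ind ∧ ind ≤ 33 then acc ++ [31 + PySem.Int.mod (ind - 31 + 1) 3]
    else acc) = acc ++ pvEmitA ind := by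
  unfold pvEmitA; split_ifs <;> simp

theorem pvStepB (acc : List Int) (ind : Int) :
    (match pvDoraCycles.find? (fun cyc => cyc.contains ind) with
      | some cyc =>
          let pos : Nat := (PySem.List.index? cyc ind).getD 0
          acc ++ (PySem.List.pyGet? cyc (PySem.Int.mod ((pos : Int) + 1) cyc.length)).toList
      | none => acc) = acc ++ pvEmitB ind := by
  unfold pvEmitB; cases h : pvDoraCycles.find? (fun cyc => cyc.contains ind) <;> simp

theorem pvFold_eq (l : List Int) (acc : List Int) :
    l.foldl (fun dora_tiles ind =>
      if 0 ≤ ind ∧ ind ≤ 26 then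
        dora_tiles ++ [(PySem.Int.floordiv ind 9) * 9 + PySem.Int.mod (PySem.Int.mod ind 9 + 1) 9]
      else if 27 ≤ ind ∧ ind ≤ 30 then dora_tiles ++ [27 + PySem.Int.mod (ind - 27 + 1) 4]
      else if 31 ≤ ind ∧ ind ≤ 33 then dora_tiles ++ [31 + PySem.Int.mod (ind - 31 + 1) 3]
      else dora_tiles) acc
    = l.foldl (fun dora_tiles ind =>
        match pvDoraCycles.find? (fun cyc => cyc.contains ind) with
        | some cyc =>
            let pos : Nat := (PySem.List.index? cyc ind).getD 0
            dora_tiles ++ (PySem.List.pyGet? cyc (PySem.Int.mod ((pos : Int) + 1) cyc.length)).toList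
        | none => dora_tiles) acc := by
  induction l generalizing acc with
  | nil => rfl
  | cons x xs ih =>
    simp only [List.foldl_cons, pvStepA acc x, pvStepB acc x, pvEmit_eq x, ih]

-- ===== VERDICT =====
theorem get_dora_tiles_internal_py_spec : Claim_equal_get_dora_tiles_internal_py := by
  intro l _
  show get_dora_tiles_internal_py l = get_dora_tiles_internal_py_alt l
  exact pvFold_eq l []
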